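-- pv_equiv track=rewrite | github.com/jarmen423/agentic-memory | experiments/healthcare/exp1A_temporal_retrieval/arms.py | _lookup_mapping
-- ===== SOURCE A (Python) =====
-- def _lookup_mapping(description: str, mapping: dict[str, str]) -> str | None:
--     """Return the longest matching substring-family mapping."""
--     description_lower = description.lower()
--     matches = [
--         (term, family)
--         for term, family in mapping.items()
--         if term.lower() in description_lower
--     ]
--     if not matches:
--         return None
--     matches.sort(key=lambda item: (-len(item[0]), item[0]))
--     return matches[0][1]
-- ===== SOURCE B (Python) =====
-- def _lookup_mapping(description: str, mapping: dict[str, str]) -> str | None: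
--     """Return the longest matching substring-family mapping (single streaming pass)."""
--     description_lower = description.lower()
--     best_term = None
--     best_family = None
--     for term, family in mapping.items():
--         if term.lower() in description_lower:
--             if (best_term is None
--                     or len(term) > len(best_term)
--                     or (len(term) == len(best_term) and term < best_term)):
--                 best_term = term
--                 best_family = family
--     return best_family
-- ===== Notes on version B (the rewrite author's own statement) =====
-- stated objective: simpler
-- what changed: Replaces build-list + sort-by-(-len,term) + take-first with a single streaming pass that keeps the current best (term, family) and updates it only on a strict improvement under the (longer term, then lexicographically smaller term) order; no intermediate match list and no sort.
import Mathlib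
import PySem

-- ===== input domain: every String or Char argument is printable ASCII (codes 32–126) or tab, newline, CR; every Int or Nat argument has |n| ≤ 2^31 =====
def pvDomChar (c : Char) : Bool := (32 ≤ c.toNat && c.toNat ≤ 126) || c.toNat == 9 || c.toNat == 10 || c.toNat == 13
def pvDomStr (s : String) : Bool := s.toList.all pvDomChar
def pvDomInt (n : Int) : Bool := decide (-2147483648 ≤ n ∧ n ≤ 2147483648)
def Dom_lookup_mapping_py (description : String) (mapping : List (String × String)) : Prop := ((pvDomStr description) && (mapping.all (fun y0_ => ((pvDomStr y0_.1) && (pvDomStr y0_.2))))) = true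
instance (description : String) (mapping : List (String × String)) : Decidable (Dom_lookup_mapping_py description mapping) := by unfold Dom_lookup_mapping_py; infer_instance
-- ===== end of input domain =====

-- B replaces A's build-match-list + sort-by-(-len,term) + take-first with one streaming pass keeping the current best match (simpler; same asymptotic cost).


-- ===== PORT A =====
-- mapping is a Python dict: the assoc list is read through PySem.Dict.ofList (duplicate keys overwrite in place), items() is its items list
def lookup_mapping_py (description : String) (mapping : List (String × String)) : Option String :=
  let description_lower := PySem.Str.lower description
  let matchList := (PySem.Dict.ofList mapping).items.filter
    (fun p => PySem.Str.isIn (PySem.Str.lower p.1) description_lower)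
  if matchList = [] then none
  else
    (PySem.List.sorted2 matchList (fun p => -(PySem.Str.len p.1 : Int)) (fun p => p.1)).head?.map (·.2)

-- ===== PORT B =====
def lookup_mapping_py_alt (description : String) (mapping : List (String × String)) : Option String :=
  let description_lower := PySem.Str.lower description
  let best := (PySem.Dict.ofList mapping).items.foldl
    (fun best p =>
      if PySem.Str.isIn (PySem.Str.lower p.1) description_lower then
        match best with
        | none => some p
        | some b =>
          if PySem.Str.len p.1 > PySem.Str.len b.1 ∨
             (PySem.Str.len p.1 = PySem.Str.len b.1 ∧ p.1 < b.1) then some p else some b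
      else best)
    none
  best.map (·.2)

-- ===== PRECONDITION & SPEC =====
def Spec_lookup_mapping_py (description : String) (mapping : List (String × String)) (out : Option String) : Prop := out = lookup_mapping_py_alt description mapping
instance (description : String) (mapping : List (String × String)) (out : Option String) : Decidable (Spec_lookup_mapping_py description mapping out) := by unfold Spec_lookup_mapping_py; infer_instance

-- ===== CLAIM (what is proved, stated in full; the proofs are below) =====
def Claim_equal_lookup_mapping_py : Prop := ∀ (description : String) (mapping : List (String × String)), Dom_lookup_mapping_py description mapping → Spec_lookup_mapping_py description mapping (lookup_mapping_py description mapping)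

-- ===== LEMMAS AND PROOFS =====

-- head of insertBy: the new head is x exactly when x goes before the old head
theorem head?_insertBy {α : Type} (before : α → α → Bool) (x : α) (ys : List α) :
    (PySem.List.insertBy before x ys).head? =
      some (match ys with
            | [] => x
            | y :: _ => if before x y then x else y) := by
  cases ys with
  | nil => rfl
  | cons y t =>
    by_cases h : before x y
    · simp [PySem.List.insertBy, h]
    · simp [PySem.List.insertBy, h]

-- head of an insertion-sort fold is the running "first minimum" fold
theorem head?_foldl_insertBy {α : Type} (before : α → α → Bool) (l : List α) (acc : List α) :
    (l.foldl (fun acc x => PySem.List.insertBy before x acc) acc).head? =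
      l.foldl (fun s x =>
        match s with
        | none => some x
        | some m => if before x m then some x else some m) acc.head? := by
  induction l generalizing acc with
  | nil => rfl
  | cons x t ih =>
    rw [List.foldl_cons, List.foldl_cons, ih, head?_insertBy]
    cases acc with
    | nil => rfl
    | cons y ys =>
      by_cases h : before x y
      · simp [h]
      · simp [h]

-- B's strict-improvement test is the lexicographic "before" of A's sort key (-len, term)
theorem better_iff_before (p b : String × String) :
    (PySem.Str.len p.1 > PySem.Str.len b.1 ∨
     (PySem.Str.len p.1 = PySem.Str.len b.1 ∧ p.1 < b.1)) ↔
    ((decide ((-(PySem.Str.len p.1 : Int)) < (-(PySem.Str.len b.1 : Int))) ||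
      (!decide ((-(PySem.Str.len b.1 : Int)) < (-(PySem.Str.len p.1 : Int))) && decide (p.1 < b.1))) = true) := by
  simp only [Bool.or_eq_true, Bool.and_eq_true, Bool.not_eq_true', decide_eq_true_eq,
    decide_eq_false_iff_not]
  constructor
  · rintro (h | ⟨h, hs⟩)
    · left; omega
    · right; exact ⟨by omega, hs⟩
  · rintro (h | ⟨h, hs⟩)
    · left; omega
    · by_cases he : PySem.Str.len p.1 = PySem.Str.len b.1
      · right; exact ⟨he, hs⟩
      · left; omega

-- the core identity between A's and B's bodies, over any description_lower and items list
theorem lookup_core_eq (dl : String) (l : List (String × String)) :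
    (if l.filter (fun p => PySem.Str.isIn (PySem.Str.lower p.1) dl) = [] then (none : Option String)
     else (PySem.List.sorted2 (l.filter (fun p => PySem.Str.isIn (PySem.Str.lower p.1) dl))
             (fun p => -(PySem.Str.len p.1 : Int)) (fun p => p.1)).head?.map (·.2))
    = (l.foldl (fun best p =>
        if PySem.Str.isIn (PySem.Str.lower p.1) dl then
          match best with
          | none => some p
          | some b =>
            if PySem.Str.len p.1 > PySem.Str.len b.1 ∨
               (PySem.Str.len p.1 = PySem.Str.len b.1 ∧ p.1 < b.1) then some p else some b
        else best) none).map (·.2) := by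
  rw [PySem.List.foldl_if_eq_foldl_filter]
  set before : String × String → String × String → Bool := fun p b =>
    decide ((-(PySem.Str.len p.1 : Int)) < (-(PySem.Str.len b.1 : Int))) ||
    (!decide ((-(PySem.Str.len b.1 : Int)) < (-(PySem.Str.len p.1 : Int))) && decide (p.1 < b.1)) with hbefore
  set f := l.filter (fun p => PySem.Str.isIn (PySem.Str.lower p.1) dl) with hf
  have hfold : f.foldl (fun best p =>
        match best with
        | none => some p
        | some b =>
          if PySem.Str.len p.1 > PySem.Str.len b.1 ∨
             (PySem.Str.len p.1 = PySem.Str.len b.1 ∧ p.1 < b.1) then some p else some b)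
      (none : Option (String × String)) =
      f.foldl (fun s x =>
        match s with
        | none => some x
        | some m => if before x m then some x else some m) none := by
    apply PySem.List.foldl_congr_mem
    intro acc x _
    cases acc with
    | none => rfl
    | some b =>
      show (if PySem.Str.len x.1 > PySem.Str.len b.1 ∨
          (PySem.Str.len x.1 = PySem.Str.len b.1 ∧ x.1 < b.1) then some x else some b) =
        (if before x b then some x else some b)
      by_cases h : PySem.Str.len x.1 > PySem.Str.len b.1 ∨
          (PySem.Str.len x.1 = PySem.Str.len b.1 ∧ x.1 < b.1)
      · rw [if_pos h, if_pos ((better_iff_before x b).mp h)]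
      · rw [if_neg h, if_neg (fun hb => h ((better_iff_before x b).mpr hb))]
  have hA : (PySem.List.sorted2 f
        (fun p => -(PySem.Str.len p.1 : Int)) (fun p => p.1)).head? =
      f.foldl (fun s x =>
        match s with
        | none => some x
        | some m => if before x m then some x else some m) none := by
    show (f.foldl (fun acc x => PySem.List.insertBy before x acc) []).head? = _
    rw [head?_foldl_insertBy, List.head?_nil]
    exact PySem.List.foldl_congr_mem _ _ _ _ (fun acc x _ => by cases acc <;> rfl)
  by_cases hm : f = []
  · rw [if_pos hm, hm]
    rfl
  · rw [if_neg hm, hA, ← hfold]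

-- ===== VERDICT (by name: the statement is the Claim_ definition above) =====
theorem lookup_mapping_py_spec : Claim_equal_lookup_mapping_py := by
  intro description mapping _
  unfold Spec_lookup_mapping_py
  exact lookup_core_eq (PySem.Str.lower description) (PySem.Dict.ofList mapping).items
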